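-- pv_equiv track=rewrite | github.com/jiangshshui/leetcode | SeventhPage/321_CreateMaximumNumber.py | top_k_in_array
-- ===== SOURCE A (Python) =====
-- def top_k_in_array(num,k):
--     stack=[]
--     length=len(num)
--     pop_num=length-k
--     i=0
--     while i<length:
--         while len(stack)!=0 and num[i]>stack[-1] and pop_num>0:
--             stack.pop()
--             pop_num-=1
--         stack.append(num[i])
--         i+=1
--     return stack[0:k]
-- ===== SOURCE B (Python) =====
-- def top_k_in_array(num, k):
--     n = len(num)
--     if k >= n:
--         return list(num[:k])
--     res = []
--     rest = list(num)
--     need = k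
--     while need > 0:
--         window = rest[:len(rest) - need + 1]
--         i = window.index(max(window))
--         res.append(rest[i])
--         rest = rest[i + 1:]
--         need -= 1
--     return res
-- ===== Notes on version B (the rewrite author's own statement) =====
-- stated objective: alternative
-- what changed: Replaces the monotonic stack with pop budget by greedy window-maximum selection: repeatedly take the leftmost maximum of the prefix that still leaves enough elements, then recurse on the suffix after it.
-- outside the precondition, e.g. on top_k_in_array([5, 3, 4], -1): A returns [5], B returns []
import Mathlib
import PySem

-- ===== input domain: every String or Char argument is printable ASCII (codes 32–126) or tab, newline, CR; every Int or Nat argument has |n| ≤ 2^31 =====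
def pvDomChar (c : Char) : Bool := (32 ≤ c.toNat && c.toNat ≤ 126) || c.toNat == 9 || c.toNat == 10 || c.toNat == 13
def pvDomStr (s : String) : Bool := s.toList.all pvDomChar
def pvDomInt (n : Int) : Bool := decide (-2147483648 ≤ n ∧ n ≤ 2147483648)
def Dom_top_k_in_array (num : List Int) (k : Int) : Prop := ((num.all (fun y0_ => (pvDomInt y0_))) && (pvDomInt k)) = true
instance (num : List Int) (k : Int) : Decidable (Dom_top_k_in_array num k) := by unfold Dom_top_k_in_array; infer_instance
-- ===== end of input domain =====

-- B replaces A's monotonic stack (with a pop budget) by greedy leftmost-window-maximum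
-- selection — a different algorithm of similar size (objective: alternative, not faster).

-- ===== PORT A =====
-- inner while: while len(stack)!=0 and num[i]>stack[-1] and pop_num>0: stack.pop(); pop_num-=1
-- (stack[-1] on a nonempty list is its getLast; stack.pop() is dropLast)
def aInner (stack : List Int) (x : Int) (pop : Int) : List Int × Int :=
  match stack with
  | [] => ([], pop)
  | a :: t =>
      if x > (a :: t).getLast (by simp) ∧ 0 < pop then
        aInner (a :: t).dropLast x (pop - 1)
      else (a :: t, pop)
termination_by stack.length
decreasing_by simp

-- outer while over i accesses num[0], num[1], … in order: recursion on the list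
def aOuter (lst : List Int) (stack : List Int) (pop : Int) : List Int :=
  match lst with
  | [] => stack
  | x :: rest =>
      let sp := aInner stack x pop
      aOuter rest (sp.1 ++ [x]) sp.2

def top_k_in_array (num : List Int) (k : Int) : List Int :=
  PySem.List.slice (aOuter num [] ((num.length : Int) - k)) (some 0) (some k)

-- ===== PORT B =====
-- while need > 0: window = rest[:len(rest)-need+1]; i = window.index(max(window)); …
-- (max() of the empty window would raise ValueError; that branch is unreachable for 0 ≤ k
--  and returns res, arbitrarily)
def bLoop (need : Nat) (rest : List Int) (res : List Int) : List Int :=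
  match need with
  | 0 => res
  | n + 1 =>
      let window := PySem.List.slice rest none (some ((rest.length : Int) - ((n : Int) + 1) + 1))
      match PySem.List.max? window (fun y => y) with
      | none => res
      | some m =>
          match PySem.List.index? window m with
          | none => res
          | some i =>
              bLoop n (PySem.List.slice rest (some ((i : Int) + 1)) none)
                (res ++ [PySem.List.pyGetD rest (i : Int) 0])

def top_k_in_array_alt (num : List Int) (k : Int) : List Int :=
  if (num.length : Int) ≤ k then PySem.List.slice num none (some k)
  else bLoop k.toNat num []

-- ===== PRECONDITION & SPEC =====
-- Pre_ excludes negative k (outside the task's natural domain): there A returns the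
-- negative slice stack[0:k] of its final stack, an artefact B does not reproduce.
def Pre_top_k_in_array (num : List Int) (k : Int) : Prop := 0 ≤ k
instance (num : List Int) (k : Int) : Decidable (Pre_top_k_in_array num k) := by
  unfold Pre_top_k_in_array; infer_instance

def pvWitness_top_k_in_array : List Int × Int := ([9, 1, 5, 3], 2)

def Spec_top_k_in_array (num : List Int) (k : Int) (out : List Int) : Prop :=
  out = top_k_in_array_alt num k
instance (num : List Int) (k : Int) (out : List Int) : Decidable (Spec_top_k_in_array num k out) := by
  unfold Spec_top_k_in_array; infer_instance

-- ===== CLAIM (what is proved, stated in full; the proofs are below) =====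
def Claim_equal_top_k_in_array : Prop :=
  ∀ (num : List Int) (k : Int), Dom_top_k_in_array num k → Pre_top_k_in_array num k →
    Spec_top_k_in_array num k (top_k_in_array num k)

-- ===== LEMMAS AND PROOFS =====

-- Proof-side model of A's loop: the stack reversed (head = top of stack), budget as Int.
def popsF : List Int → Int → Int → List Int × Int
  | [], _, d => ([], d)
  | t :: s, x, d => if x > t ∧ 0 < d then popsF s x (d - 1) else (t :: s, d)

def stepF (st : List Int × Int) (x : Int) : List Int × Int :=
  (x :: (popsF st.1 x st.2).1, (popsF st.1 x st.2).2)

theorem aInner_append (t : List Int) (a x p : Int) :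
    aInner (t ++ [a]) x p = if x > a ∧ 0 < p then aInner t x (p - 1) else (t ++ [a], p) := by
  cases t with
  | nil => simp [aInner]
  | cons b u =>
      simp [aInner, List.getLast_cons, List.dropLast_cons_of_ne_nil]

theorem aInner_eq (r : List Int) (x : Int) : ∀ p : Int,
    aInner r.reverse x p = ((popsF r x p).1.reverse, (popsF r x p).2) := by
  induction r with
  | nil => intro p; simp [aInner, popsF]
  | cons t r ih =>
      intro p
      rw [List.reverse_cons, aInner_append]
      simp only [popsF]
      by_cases hc : x > t ∧ 0 < p
      · rw [if_pos hc, if_pos hc, ih (p - 1)]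
      · rw [if_neg hc, if_neg hc, List.reverse_cons]

theorem aOuter_eq (xs : List Int) : ∀ (s : List Int) (p : Int),
    aOuter xs s p = (xs.foldl stepF (s.reverse, p)).1.reverse := by
  induction xs with
  | nil => intro s p; simp [aOuter]
  | cons x xs ih =>
      intro s p
      have hin : aInner s x p = ((popsF s.reverse x p).1.reverse, (popsF s.reverse x p).2) := by
        have := aInner_eq s.reverse x p
        rwa [List.reverse_reverse] at this
      simp only [aOuter, hin, ih, List.foldl_cons, stepF]
      simp

theorem popsF_nopop (s : List Int) (x p : Int) (h : p ≤ 0) : popsF s x p = (s, p) := by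
  induction s with
  | nil => simp [popsF]
  | cons t s ih =>
      simp only [popsF]
      rw [if_neg (by omega)]

theorem foldl_stepF_nopop (xs s : List Int) (p : Int) (h : p ≤ 0) :
    xs.foldl stepF (s, p) = (xs.reverse ++ s, p) := by
  induction xs generalizing s with
  | nil => simp
  | cons x xs ih =>
      simp only [List.foldl_cons, stepF, popsF_nopop _ _ _ h]
      rw [ih (x :: s)]
      simp

theorem popsF_len (s : List Int) (x d : Int) :
    (popsF s x d).2 + (s.length : Int) = d + ((popsF s x d).1.length : Int) := by
  induction s generalizing d with
  | nil => simp [popsF]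
  | cons t s ih =>
      simp only [popsF]
      split
      · have := ih (d - 1); simp only [List.length_cons]; push_cast at this ⊢; omega
      · simp

theorem popsF_subset (s : List Int) (x d : Int) {y : Int} (h : y ∈ (popsF s x d).1) : y ∈ s := by
  induction s generalizing d with
  | nil => simpa [popsF] using h
  | cons t s ih =>
      simp only [popsF] at h
      split at h
      · exact List.mem_cons_of_mem _ (ih _ h)
      · simpa using h

theorem foldl_stepF_len (xs : List Int) (s : List Int) (d : Int) :
    (xs.foldl stepF (s, d)).2 + (s.length : Int) + (xs.length : Int)
      = d + (((xs.foldl stepF (s, d)).1.length : Int)) := by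
  induction xs generalizing s d with
  | nil => simp
  | cons x xs ih =>
      simp only [List.foldl_cons, stepF]
      have h1 := popsF_len s x d
      have h2 := ih (x :: (popsF s x d).1) (popsF s x d).2
      simp only [List.length_cons] at h2 ⊢
      push_cast at h1 h2 ⊢
      omega

theorem foldl_stepF_mem (xs : List Int) (s : List Int) (d : Int) {y : Int}
    (h : y ∈ (xs.foldl stepF (s, d)).1) : y ∈ xs ∨ y ∈ s := by
  induction xs generalizing s d with
  | nil => right; simp at h; exact h
  | cons x xs ih =>
      simp only [List.foldl_cons, stepF] at h
      rcases ih _ _ h with h' | h'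
      · exact Or.inl (List.mem_cons_of_mem _ h')
      · rcases List.mem_cons.1 h' with rfl | h''
        · exact Or.inl (List.mem_cons_self ..)
        · exact Or.inr (popsF_subset _ _ _ h'')

theorem popsF_all (s : List Int) (x : Int) : ∀ d : Int, (∀ y ∈ s, y < x) →
    (s.length : Int) ≤ d → popsF s x d = ([], d - s.length) := by
  induction s with
  | nil => intro d _ _; simp [popsF]
  | cons t s ih =>
      intro d hlt hd
      simp only [popsF]
      rw [if_pos ⟨hlt t (List.mem_cons_self ..), by simp at hd; omega⟩]
      rw [ih (d - 1) (fun y hy => hlt y (List.mem_cons_of_mem _ hy)) (by simp at hd ⊢; omega)]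
      simp
      omega

theorem popsF_append_bot (m x : Int) (s : List Int) (d : Int)
    (h : (s.length : Int) < d → x ≤ m) :
    popsF (s ++ [m]) x d = ((popsF s x d).1 ++ [m], (popsF s x d).2) := by
  induction s generalizing d with
  | nil =>
      simp only [List.nil_append, popsF]
      rw [if_neg (by simp at h; omega)]
  | cons t s ih =>
      simp only [List.cons_append, popsF]
      split
      · exact ih (d - 1) (by simp at h ⊢; omega)
      · simp

theorem foldl_stepF_bot (m : Int) (S : List Int) (s : List Int) (d : Int)
    (h : ∀ (u : Nat) (y : Int), (u : Int) < d - (s.length : Int) → S[u]? = some y → y ≤ m) :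
    S.foldl stepF (s ++ [m], d)
      = ((S.foldl stepF (s, d)).1 ++ [m], (S.foldl stepF (s, d)).2) := by
  induction S generalizing s d with
  | nil => simp
  | cons x S ih =>
      have hx : (s.length : Int) < d → x ≤ m := fun hlt => h 0 x (by simpa using hlt) (by simp)
      have hcons : x :: ((popsF s x d).1 ++ [m]) = (x :: (popsF s x d).1) ++ [m] := by simp
      simp only [List.foldl_cons, stepF, popsF_append_bot m x s d hx, hcons]
      rw [ih]
      intro u y hu hg
      have hlen := popsF_len s x d
      refine h (u + 1) y ?_ (by simpa using hg)
      simp only [List.length_cons] at hu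
      push_cast at hu hlen ⊢
      omega

theorem bLoop_acc (n : Nat) : ∀ rest res : List Int,
    bLoop n rest res = res ++ bLoop n rest [] := by
  induction n with
  | zero => intro rest res; simp [bLoop]
  | succ n ih =>
      intro rest res
      simp only [bLoop]
      split
      · next h1 => simp
      · next m h1 =>
          split
          · next h2 => simp
          · next i h2 =>
              rw [ih (PySem.List.slice rest (some ((i : Int) + 1)) none)
                    (res ++ [PySem.List.pyGetD rest (i : Int) 0]),
                  ih (PySem.List.slice rest (some ((i : Int) + 1)) none)
                    ([] ++ [PySem.List.pyGetD rest (i : Int) 0])]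
              simp

theorem main_greedy (k : Nat) : ∀ num : List Int, k ≤ num.length →
    ((num.foldl stepF ([], (num.length : Int) - (k : Int))).1.reverse).take k
      = bLoop k num [] := by
  induction k with
  | zero => intro num _; simp [bLoop]
  | succ k ih =>
      intro num hk
      have hb : (num.length : Int) - ((k : Int) + 1) + 1 = ((num.length - k : Nat) : Int) := by
        push_cast; omega
      have hw : PySem.List.slice num none (some ((num.length : Int) - ((k : Int) + 1) + 1))
          = num.take (num.length - k) := by
        rw [hb, PySem.List.slice_to_natCast]
      have hwlen : (num.take (num.length - k)).length = num.length - k := by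
        simp [List.length_take]
      have hwne : num.take (num.length - k) ≠ [] := by
        apply List.ne_nil_of_length_pos
        rw [hwlen]; omega
      obtain ⟨m, hm⟩ : ∃ m, PySem.List.max? (num.take (num.length - k)) (fun y => y) = some m := by
        cases h : PySem.List.max? (num.take (num.length - k)) (fun y => y) with
        | none => exact absurd ((PySem.List.max?_eq_none_iff _ _).mp h) hwne
        | some m => exact ⟨m, rfl⟩
      have hmmem : m ∈ num.take (num.length - k) := PySem.List.max?_mem hm
      have hmmax : ∀ y ∈ num.take (num.length - k), y ≤ m := by
        intro y hy; exact PySem.List.max?_isMax hm y hy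
      obtain ⟨i, hi⟩ : ∃ i, PySem.List.index? (num.take (num.length - k)) m = some i := by
        cases h : PySem.List.index? (num.take (num.length - k)) m with
        | none => exact absurd ((PySem.List.index?_eq_none_iff _ _).mp h) (by simp only [not_not]; exact hmmem)
        | some i => exact ⟨i, rfl⟩
      obtain ⟨hilt, hieq, hprev⟩ := PySem.List.getElem_of_index?_eq_some hi
      rw [hwlen] at hilt
      have hiltn : i < num.length := by omega
      have hwi : num[i]'hiltn = m := by
        rw [← hieq]; simp [List.getElem_take]
      have hlenP : (num.take i).length = i := by simp [List.length_take]; omega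
      have hmemP : ∀ y ∈ ((num.take i).foldl stepF ([], (num.length : Int) - ((k : Int) + 1))).1,
          y < m := by
        intro y hy
        rcases foldl_stepF_mem _ _ _ hy with h' | h'
        · obtain ⟨j, hj, hjy⟩ := List.mem_iff_getElem.mp h'
          rw [hlenP] at hj
          have hjw : j < (num.take (num.length - k)).length := by rw [hwlen]; omega
          have hyj : y = (num.take (num.length - k))[j]'hjw := by
            rw [← hjy]; simp [List.getElem_take]
          have hne : y ≠ m := by rw [hyj]; exact hprev j (by omega)
          have hle : y ≤ m := hmmax y (by rw [hyj]; exact List.getElem_mem _)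
          omega
        · simp at h'
      have hlen := foldl_stepF_len (num.take i) [] ((num.length : Int) - ((k : Int) + 1))
      rw [hlenP] at hlen
      simp only [List.length_nil, Nat.cast_zero, add_zero] at hlen
      have hstep : stepF ((num.take i).foldl stepF ([], (num.length : Int) - ((k : Int) + 1))) m
          = ([m], (num.length : Int) - ((k : Int) + 1) - (i : Int)) := by
        have hall := popsF_all ((num.take i).foldl stepF ([], (num.length : Int) - ((k : Int) + 1))).1 m
          ((num.take i).foldl stepF ([], (num.length : Int) - ((k : Int) + 1))).2 hmemP
          (by omega)
        simp only [stepF, hall]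
        refine Prod.ext rfl ?_
        simp only
        omega
      have hdecomp : num = num.take i ++ num[i]'hiltn :: num.drop (i + 1) := by
        conv_lhs => rw [← List.take_append_drop i num]
        rw [List.getElem_cons_drop]
      have hfold : num.foldl stepF ([], (num.length : Int) - ((k : Int) + 1))
          = (num.drop (i + 1)).foldl stepF ([m], (num.length : Int) - ((k : Int) + 1) - (i : Int)) := by
        have hc := congrArg
          (fun l => List.foldl stepF (([] : List Int), (num.length : Int) - ((k : Int) + 1)) l) hdecomp
        simp only at hc
        rw [hc, List.foldl_append, List.foldl_cons, hwi, hstep]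
      have hbot := foldl_stepF_bot m (num.drop (i + 1)) []
          ((num.length : Int) - ((k : Int) + 1) - (i : Int)) (by
        intro u y hu hgy
        simp only [List.length_nil, Nat.cast_zero, sub_zero] at hu
        have hgy' : num[i + 1 + u]? = some y := by
          rw [← List.getElem?_drop]; exact hgy
        have hrange : i + 1 + u < num.length := by
          by_contra hcon
          rw [List.getElem?_eq_none (by omega)] at hgy'
          simp at hgy'
        have hval : y = num[i + 1 + u]'hrange := by
          rw [List.getElem?_eq_getElem hrange] at hgy'
          exact ((Option.some.injEq _ _).mp hgy').symm
        refine hmmax y ?_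
        rw [hval]
        have hwin : (num.take (num.length - k))[i + 1 + u]'(by rw [hwlen]; omega)
            = num[i + 1 + u]'hrange := by simp [List.getElem_take]
        rw [← hwin]
        exact List.getElem_mem _)
      have hdroplen : (num.drop (i + 1)).length = num.length - (i + 1) := by simp
      have hih := ih (num.drop (i + 1)) (by rw [hdroplen]; omega)
      have hbudget : ((num.drop (i + 1)).length : Int) - (k : Int)
          = (num.length : Int) - ((k : Int) + 1) - (i : Int) := by
        rw [hdroplen]; push_cast; omega
      rw [hbudget] at hih
      have hrest : PySem.List.slice num (some ((i : Int) + 1)) none = num.drop (i + 1) := by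
        have h1 : (i : Int) + 1 = ((i + 1 : Nat) : Int) := by push_cast; ring
        rw [h1, PySem.List.slice_from_natCast]
      have hget : PySem.List.pyGetD num (i : Int) 0 = m := by
        rw [PySem.List.pyGetD_natCast, List.getD_eq_getElem _ _ hiltn, hwi]
      calc ((num.foldl stepF ([], (num.length : Int) - ((k : Int) + 1))).1.reverse).take (k + 1)
          = m :: bLoop k (num.drop (i + 1)) [] := by
            rw [hfold]
            simp only [List.nil_append] at hbot
            rw [hbot]
            simp only [List.reverse_append, List.reverse_cons, List.reverse_nil, List.nil_append,
              List.cons_append, List.take_succ_cons]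
            rw [hih]
        _ = bLoop (k + 1) num [] := by
            simp only [bLoop]
            rw [hw, hm]
            simp only
            rw [hi]
            simp only
            rw [hrest, hget, bLoop_acc k (num.drop (i + 1)) ([] ++ [m])]
            simp

-- ===== VERDICT (by name: the statement is the Claim_ definition above) =====
theorem top_k_in_array_spec : Claim_equal_top_k_in_array := by
  intro num k _ hpre
  unfold Pre_top_k_in_array at hpre
  unfold Spec_top_k_in_array top_k_in_array top_k_in_array_alt
  rw [aOuter_eq]
  simp only [List.reverse_nil]
  by_cases hk : (num.length : Int) ≤ k
  · rw [if_pos hk, foldl_stepF_nopop num [] ((num.length : Int) - k) (by omega)]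
    simp
  · rw [if_neg hk]
    have hksub : (num.length : Int) - k = (num.length : Int) - ((k.toNat : Nat) : Int) := by omega
    rw [hksub, PySem.List.slice_zero_start, PySem.List.slice_to _ hpre]
    exact main_greedy k.toNat num (by omega)
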